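-- pv_equiv track=rewrite | github.com/Nikita533-cmd/spec-auto-copy | main/mixins.py | _pages_generator
-- ===== SOURCE A (Python) =====
-- def _pages_generator(pages, page):
--     """
--     список номеров страниц, которые мы показыаем в пагинаторе
--     пример: 1, 2, 3, ... , 55, 56, 57, ...  90, 91
--     """
--
--     return [
--         p
--         for p in sorted(
--             set(list(range(1, 4)) + list(range(page - 3, page + 3)) + list(range(pages - 3, pages + 1)))
--         )
--         if 0 < p <= pages
--     ]
-- ===== SOURCE B (Python) =====
-- def _pages_generator(pages, page):
--     # O(1): clip the three display windows to [1, pages], process them in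
--     # order of start, and emit disjoint runs with a sweep cursor -- no set,
--     # no per-page scan, output sorted and duplicate-free by construction.
--     intervals = sorted([(1, 3), (page - 3, page + 2), (pages - 3, pages)],
--                        key=lambda t: t[0])
--     out = []
--     cur = 1
--     for s, e in intervals:
--         s = max(s, cur)
--         e = min(e, pages)
--         if s <= e:
--             out.extend(range(s, e + 1))
--             cur = e + 1
--     return out
-- ===== Notes on version B (the rewrite author's own statement) =====
-- stated objective: alternative
-- what changed: Replaces building a set from three materialised ranges, sorting it and filtering to 0 < p <= pages by an O(1)-space interval sweep: the three display windows are clipped to [1, pages], ordered by start, and emitted as disjoint runs with a cursor, so no set, sort of page numbers or bounds filter is needed.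
import Mathlib
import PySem

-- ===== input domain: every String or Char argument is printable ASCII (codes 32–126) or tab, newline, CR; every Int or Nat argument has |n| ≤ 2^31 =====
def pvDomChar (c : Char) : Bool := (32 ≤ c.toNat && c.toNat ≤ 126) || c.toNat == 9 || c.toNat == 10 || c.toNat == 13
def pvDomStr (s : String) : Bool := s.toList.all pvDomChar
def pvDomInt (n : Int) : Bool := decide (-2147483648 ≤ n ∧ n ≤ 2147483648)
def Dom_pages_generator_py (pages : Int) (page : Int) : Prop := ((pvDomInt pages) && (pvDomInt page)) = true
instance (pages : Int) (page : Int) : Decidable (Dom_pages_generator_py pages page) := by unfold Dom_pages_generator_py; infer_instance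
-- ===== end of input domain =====

-- B replaces A's set + sort + bounds filter by an O(1) sweep over the three clipped display windows sorted by start.

-- ===== PORT A =====
def pages_generator_py (pages : Int) (page : Int) : List Int :=
  (PySem.List.sorted
      (PySem.Set.ofList
        (PySem.List.pyRange 1 4 1 ++ PySem.List.pyRange (page - 3) (page + 3) 1
          ++ PySem.List.pyRange (pages - 3) (pages + 1) 1))
      (fun x => x) false).filter (fun p => decide (0 < p ∧ p ≤ pages))

-- ===== PORT B =====
-- the for-loop of Source B as structural recursion over the sorted interval list, with the sweep cursor `cur`
def pvSweep (pages : Int) : List (Int × Int) → Int → List Int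
  | [], _ => []
  | (s, e) :: rest, cur =>
    let s' := max s cur
    let e' := min e pages
    if s' ≤ e' then PySem.List.pyRange s' (e' + 1) 1 ++ pvSweep pages rest (e' + 1)
    else pvSweep pages rest cur

def pages_generator_py_alt (pages : Int) (page : Int) : List Int :=
  pvSweep pages
    (PySem.List.sorted [(1, 3), (page - 3, page + 2), (pages - 3, pages)] (fun t => t.1) false) 1

-- ===== PRECONDITION & SPEC =====
def Spec_pages_generator_py (pages : Int) (page : Int) (out : List Int) : Prop := out = pages_generator_py_alt pages page
instance (pages : Int) (page : Int) (out : List Int) : Decidable (Spec_pages_generator_py pages page out) := by unfold Spec_pages_generator_py; infer_instance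

-- ===== CLAIM (what is proved, stated in full; the proofs are below) =====
def Claim_equal_pages_generator_py : Prop := ∀ (pages : Int) (page : Int), Dom_pages_generator_py pages page → Spec_pages_generator_py pages page (pages_generator_py pages page)

-- ===== LEMMAS AND PROOFS =====

theorem pvSweep_lb (pages : Int) (l : List (Int × Int)) (cur p : Int)
    (hp : p ∈ pvSweep pages l cur) : cur ≤ p := by
  induction l generalizing cur with
  | nil => simp [pvSweep] at hp
  | cons q rest ih =>
    obtain ⟨s, e⟩ := q
    simp only [pvSweep] at hp
    split_ifs at hp with h
    · rcases List.mem_append.1 hp with h1 | h1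
      · have := (PySem.List.mem_pyRange_one.1 h1).1; omega
      · have := ih _ h1; omega
    · exact ih _ hp

theorem pvSweep_pairwise (pages : Int) (l : List (Int × Int)) (cur : Int) :
    (pvSweep pages l cur).Pairwise (· < ·) := by
  induction l generalizing cur with
  | nil => simp [pvSweep]
  | cons q rest ih =>
    obtain ⟨s, e⟩ := q
    simp only [pvSweep]
    split_ifs with h
    · refine List.pairwise_append.2 ⟨PySem.List.pairwise_lt_pyRange_one _ _, ih _, ?_⟩
      intro a ha b hb
      have h1 := (PySem.List.mem_pyRange_one.1 ha).2
      have h2 := pvSweep_lb pages rest _ b hb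
      omega
    · exact ih _

theorem pvSweep_mem (pages : Int) (l : List (Int × Int)) (cur p : Int)
    (hl : l.Pairwise (fun a b => a.1 ≤ b.1)) :
    p ∈ pvSweep pages l cur ↔ cur ≤ p ∧ p ≤ pages ∧ ∃ q ∈ l, q.1 ≤ p ∧ p ≤ q.2 := by
  induction l generalizing cur with
  | nil => simp [pvSweep]
  | cons q rest ih =>
    obtain ⟨s, e⟩ := q
    have hrest := hl.of_cons
    have hhead : ∀ q' ∈ rest, s ≤ q'.1 := fun q' hq' => List.rel_of_pairwise_cons hl hq'
    simp only [pvSweep]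
    split_ifs with h
    · constructor
      · intro hp
        rcases List.mem_append.1 hp with h1 | h1
        · have := PySem.List.mem_pyRange_one.1 h1
          exact ⟨by omega, by omega, ⟨s, e⟩, by simp, by omega, by omega⟩
        · obtain ⟨hc, hpg, q', hq', hq1, hq2⟩ := (ih _ hrest).1 h1
          exact ⟨by omega, hpg, q', List.mem_cons_of_mem _ hq', hq1, hq2⟩
      · rintro ⟨hc, hpg, q', hq', hq1, hq2⟩
        by_cases hle : p ≤ min e pages
        · -- p lands in the head's emitted run: its start ≤ p since every interval start ≤ p or head's own
          have hs : s ≤ p := by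
            rcases List.mem_cons.1 hq' with rfl | hmem
            · exact hq1
            · exact le_trans (hhead _ hmem) hq1
          exact List.mem_append.2 (Or.inl (PySem.List.mem_pyRange_one.2 ⟨by omega, by omega⟩))
        · refine List.mem_append.2 (Or.inr ((ih _ hrest).2 ⟨by omega, hpg, q', ?_, hq1, hq2⟩))
          rcases List.mem_cons.1 hq' with rfl | hmem
          · simp at hle; omega
          · exact hmem
    · rw [ih _ hrest]
      constructor
      · rintro ⟨hc, hpg, q', hq', hq1, hq2⟩
        exact ⟨hc, hpg, q', List.mem_cons_of_mem _ hq', hq1, hq2⟩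
      · rintro ⟨hc, hpg, q', hq', hq1, hq2⟩
        refine ⟨hc, hpg, q', ?_, hq1, hq2⟩
        rcases List.mem_cons.1 hq' with rfl | hmem
        · simp only at hq1 hq2; omega
        · exact hmem

theorem pages_mem_iff (pages page p : Int) :
    p ∈ pages_generator_py pages page ↔ p ∈ pages_generator_py_alt pages page := by
  rw [pages_generator_py_alt,
    pvSweep_mem pages _ 1 p (PySem.List.sorted_pairwise _ _)]
  simp [pages_generator_py, List.mem_filter, PySem.List.mem_sorted,
    PySem.Set.mem_ofList, PySem.List.mem_pyRange_one]
  omega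

theorem pages_A_sorted (pages page : Int) :
    (pages_generator_py pages page).Pairwise (· < ·) := by
  unfold pages_generator_py
  exact (PySem.List.sorted_ofList_pairwise_lt _).filter _

theorem pages_perm (pages page : Int) :
    (pages_generator_py pages page).Perm (pages_generator_py_alt pages page) := by
  refine (List.perm_ext_iff_of_nodup ?_ ?_).mpr (fun a => pages_mem_iff pages page a)
  · exact (pages_A_sorted pages page).imp ne_of_lt
  · exact (pvSweep_pairwise pages _ 1).imp ne_of_lt

-- ===== VERDICT (by name: the statement is the Claim_ definition above) =====
theorem pages_generator_py_spec : Claim_equal_pages_generator_py := by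
  intro pages page _
  exact (pages_perm pages page).eq_of_pairwise
    (fun a b _ _ h1 h2 => absurd h2 (lt_asymm h1))
    (pages_A_sorted pages page) (pvSweep_pairwise pages _ 1)
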